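-- pv_equiv track=rewrite | github.com/eddieatkinson/Algorithms | sort_squares.py | merge_and_sort
-- ===== SOURCE A (Python) =====
-- def merge_and_sort(a, b):
-- 	final_array = []
-- 	while len(a) != 0 and len(b) != 0:
-- 		if abs(a[len(a) - 1]) > abs(b[0]):
-- 			final_array.append(b[0] * b[0])
-- 			b.pop(0)
-- 		elif abs(a[len(a) - 1]) <= abs(b[0]):
-- 			final_array.append(a[len(a) - 1] * a[len(a) - 1])
-- 			a.pop(len(a) - 1)
-- 	if len(a) > 0:
-- 		final_array += a
-- 	else:
-- 		final_array += b
-- 	return final_array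
-- ===== SOURCE B (Python) =====
-- def merge_and_sort(a, b):
--     # Two-pointer merge: index i walks b forward, j walks a backward,
--     # no pop(0)/pop() calls and no mutation of the arguments.
--     i, j, n = 0, len(a) - 1, len(b)
--     out = []
--     while j >= 0 and i < n:
--         x, y = a[j], b[i]
--         if abs(x) > abs(y):
--             out.append(y * y)
--             i += 1
--         else:
--             out.append(x * x)
--             j -= 1
--     return out + (a[:j + 1] if j >= 0 else b[i:])
-- ===== Notes on version B (the rewrite author's own statement) =====
-- stated objective: faster
-- what changed: Replaces the destructive loop that pops b's front (O(n) per pop) and a's tail with a single two-pointer index merge over the unmodified lists, appending the leftover segment by slicing.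
import Mathlib
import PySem

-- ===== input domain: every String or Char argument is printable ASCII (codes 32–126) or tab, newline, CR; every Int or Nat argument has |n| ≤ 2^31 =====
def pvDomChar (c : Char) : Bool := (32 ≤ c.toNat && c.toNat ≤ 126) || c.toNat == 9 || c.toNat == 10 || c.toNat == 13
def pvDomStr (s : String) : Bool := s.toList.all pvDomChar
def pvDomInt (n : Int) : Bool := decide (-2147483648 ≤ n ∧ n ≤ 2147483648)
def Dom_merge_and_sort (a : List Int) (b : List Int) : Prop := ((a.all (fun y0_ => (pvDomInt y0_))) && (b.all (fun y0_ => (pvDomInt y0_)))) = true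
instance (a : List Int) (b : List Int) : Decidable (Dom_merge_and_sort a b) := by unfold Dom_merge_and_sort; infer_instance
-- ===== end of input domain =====

-- B replaces A's destructive pop(0)/pop() loop by a two-pointer index merge (faster);
-- A mutates its arguments in place (pops from a and b), B does not: the equivalence proved is about the return value only.

-- ===== PORT A =====
-- while len(a) != 0 and len(b) != 0: compare abs(a[len(a)-1]) with abs(b[0]); the if/elif pair is
-- exhaustive, so it is ported as if/else. b.pop(0) = tail, a.pop(len(a)-1) = dropLast.
-- The loop runs at most len(a)+len(b) times (one element is consumed per iteration), so that fuel
-- makes the recursion structural; the fuel-0 case repeats the loop's exit expression and is never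
-- reached from merge_and_sort.
def mergeA_loop : Nat → List Int → List Int → List Int → List Int
  | 0, final_array, a, b =>
      if a.length > 0 then final_array ++ a else final_array ++ b
  | fuel + 1, final_array, a, b =>
      if h : a ≠ [] ∧ b ≠ [] then
        if |a.getLast h.1| > |b.head h.2| then
          mergeA_loop fuel (final_array ++ [b.head h.2 * b.head h.2]) a b.tail
        else
          mergeA_loop fuel (final_array ++ [a.getLast h.1 * a.getLast h.1]) a.dropLast b
      else if a.length > 0 then final_array ++ a else final_array ++ b

def merge_and_sort (a : List Int) (b : List Int) : List Int :=
  mergeA_loop (a.length + b.length) [] a b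

-- ===== PORT B =====
-- two pointers: i walks b forward, j walks a backward; a[j] / b[i] are always in range inside the
-- loop (0 ≤ j < len a, 0 ≤ i < n), so the pyGetD default 0 is unreachable. The loop runs at most
-- len(a)+len(b) times; the fuel-0 case repeats the loop's exit expression and is never reached
-- from merge_and_sort_alt.
def mergeB_loop : Nat → List Int → List Int → Int → List Int → Int → Int → List Int
  | 0, a, b, _n, out, j, i =>
      if j ≥ 0 then out ++ PySem.List.slice a none (some (j + 1))
      else out ++ PySem.List.slice b (some i) none
  | fuel + 1, a, b, n, out, j, i =>
      if j ≥ 0 ∧ i < n then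
        let x := PySem.List.pyGetD a j 0
        let y := PySem.List.pyGetD b i 0
        if |x| > |y| then mergeB_loop fuel a b n (out ++ [y * y]) j (i + 1)
        else mergeB_loop fuel a b n (out ++ [x * x]) (j - 1) i
      else if j ≥ 0 then out ++ PySem.List.slice a none (some (j + 1))
      else out ++ PySem.List.slice b (some i) none

def merge_and_sort_alt (a : List Int) (b : List Int) : List Int :=
  mergeB_loop (a.length + b.length) a b b.length [] ((a.length : Int) - 1) 0

-- ===== PRECONDITION & SPEC =====
def Spec_merge_and_sort (a : List Int) (b : List Int) (out : List Int) : Prop := out = merge_and_sort_alt a b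
instance (a : List Int) (b : List Int) (out : List Int) : Decidable (Spec_merge_and_sort a b out) := by unfold Spec_merge_and_sort; infer_instance

-- ===== CLAIM (what is proved, stated in full; the proofs are below) =====
def Claim_equal_merge_and_sort : Prop := ∀ (a : List Int) (b : List Int), Dom_merge_and_sort a b → Spec_merge_and_sort a b (merge_and_sort a b)

-- ===== LEMMAS AND PROOFS =====

-- Exit case: when the two-pointer loop stops, the appended slice is exactly A's leftover segment.
lemma mergeB_exit (a b out : List Int) (j i : Int)
    (hj1 : -1 ≤ j) (hj2 : j < a.length) (hi1 : 0 ≤ i) (_hi2 : i ≤ b.length)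
    (hcond : ¬ (j ≥ 0 ∧ i < (b.length : Int))) :
    (if j ≥ 0 then out ++ PySem.List.slice a none (some (j + 1))
     else out ++ PySem.List.slice b (some i) none)
      = (if (a.take (j + 1).toNat).length > 0
         then out ++ a.take (j + 1).toNat else out ++ b.drop i.toNat) := by
  by_cases hj0 : j ≥ 0
  · have hdrop : b.drop i.toNat = [] := List.drop_eq_nil_of_le (by omega)
    have hlen : (a.take (j + 1).toNat).length > 0 := by
      simp [List.length_take]; omega
    rw [if_pos hj0, PySem.List.slice_to a (by omega), if_pos hlen]
  · have htake : a.take (j + 1).toNat = [] := by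
      have : (j + 1).toNat = 0 := by omega
      simp [this]
    rw [if_neg hj0, PySem.List.slice_from b hi1, if_neg (by rw [htake]; simp)]

-- Invariant: with enough fuel, the two-pointer loop over (j, i) computes what A's destructive loop
-- computes on the remaining segments a[:j+1] and b[i:].
lemma mergeB_eq_mergeA (k : Nat) (a b : List Int) :
    ∀ (out : List Int) (j i : Int),
      (j + 1).toNat + (b.length - i.toNat) ≤ k →
      -1 ≤ j → j < a.length → 0 ≤ i → i ≤ b.length →
      mergeB_loop k a b b.length out j i
        = mergeA_loop k out (a.take (j + 1).toNat) (b.drop i.toNat) := by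
  induction k with
  | zero =>
    intro out j i hk hj1 hj2 hi1 hi2
    simp only [mergeB_loop, mergeA_loop]
    exact mergeB_exit a b out j i hj1 hj2 hi1 hi2 (by omega)
  | succ k ih =>
    intro out j i hk hj1 hj2 hi1 hi2
    by_cases hcond : j ≥ 0 ∧ i < (b.length : Int)
    · obtain ⟨hj0, hin⟩ := hcond
      have hjn : j.toNat < a.length := by omega
      have hiN : i.toNat < b.length := by omega
      have hx : PySem.List.pyGetD a j 0 = a[j.toNat] :=
        PySem.List.pyGetD_eq_getElem a 0 hj0 (by omega)
      have hy : PySem.List.pyGetD b i 0 = b[i.toNat] :=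
        PySem.List.pyGetD_eq_getElem b 0 hi1 (by omega)
      have htake : a.take (j + 1).toNat = a.take j.toNat ++ [a[j.toNat]] := by
        have h1 : (j + 1).toNat = j.toNat + 1 := by omega
        rw [h1, List.take_succ]
        simp [List.getElem?_eq_getElem hjn]
      have hdrop : b.drop i.toNat = b[i.toNat] :: b.drop (i.toNat + 1) :=
        List.drop_eq_getElem_cons hiN
      have htne : a.take (j + 1).toNat ≠ [] := by
        intro hnil; rw [htake] at hnil
        have h := congrArg List.length hnil; simp at h
        rw [h] at hjn; simp at hjn
      have hdne : b.drop i.toNat ≠ [] := by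
        intro hnil; rw [hdrop] at hnil
        have h := congrArg List.length hnil; simp at h; omega
      have hlast : (a.take (j + 1).toNat).getLast htne = a[j.toNat] := by
        apply Option.some.inj
        rw [← List.getLast?_eq_getLast, htake, List.getLast?_concat]
      have hhead : (b.drop i.toNat).head hdne = b[i.toNat] := by
        apply Option.some.inj
        rw [← List.head?_eq_head, hdrop, List.head?_cons]
      rw [mergeB_loop, if_pos ⟨hj0, hin⟩]
      conv_rhs => rw [mergeA_loop]
      rw [dif_pos ⟨htne, hdne⟩, hlast, hhead]
      simp only [hx, hy]
      by_cases hgt : |a[j.toNat]| > |b[i.toNat]|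
      · rw [if_pos hgt, if_pos hgt]
        have htail : (b.drop i.toNat).tail = b.drop (i + 1).toNat := by
          rw [hdrop, List.tail_cons]; congr 1; omega
        rw [htail]
        exact ih (out ++ [b[i.toNat] * b[i.toNat]]) j (i + 1) (by omega) hj1 hj2 (by omega) (by omega)
      · rw [if_neg hgt, if_neg hgt]
        have hdl : (a.take (j + 1).toNat).dropLast = a.take ((j - 1) + 1).toNat := by
          rw [htake, List.dropLast_concat]; congr 1; omega
        rw [ih (out ++ [a[j.toNat] * a[j.toNat]]) (j - 1) i (by omega) (by omega) (by omega) hi1 hi2]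
        rw [hdl]
    · rw [mergeB_loop, if_neg hcond]
      conv_rhs => rw [mergeA_loop]
      rw [dif_neg (by
        intro hne
        rcases hne with ⟨h1, h2⟩
        apply hcond
        constructor
        · by_contra hj0
          refine h1 ?_
          have h0 : (j + 1).toNat = 0 := by omega
          simp [h0]
        · by_contra hin
          exact h2 (List.drop_eq_nil_of_le (by omega)))]
      exact mergeB_exit a b out j i hj1 hj2 hi1 hi2 hcond

-- ===== VERDICT (by name: the statement is the Claim_ definition above) =====
theorem merge_and_sort_spec : Claim_equal_merge_and_sort := by
  intro a b _
  unfold Spec_merge_and_sort merge_and_sort merge_and_sort_alt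
  rw [mergeB_eq_mergeA (a.length + b.length) a b
        [] ((a.length : Int) - 1) 0 (by omega) (by omega) (by omega) le_rfl (by omega)]
  have h1 : (((a.length : Int) - 1) + 1).toNat = a.length := by omega
  rw [h1]; simp
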